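-- pv_equiv track=rewrite | github.com/PohSayKeong/ubscc | routes/riggedDealer.py | riffle_shuffle
-- ===== SOURCE A (Python) =====
-- def riffle_shuffle(deck):
--     """Perform a riffle shuffle on the deck."""
--     mid = len(deck) // 2
--     left = deck[:mid]
--     right = deck[mid:]
--     shuffled = []
--
--     while left or right:
--         if left:
--             shuffled.append(left.pop(0))
--         if right:
--             shuffled.append(right.pop(0))
--
--     return shuffled
-- ===== SOURCE B (Python) =====
-- def riffle_shuffle(deck):
--     """Perform a riffle shuffle on the deck."""
--     mid = len(deck) // 2
--     left = deck[:mid]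
--     right = deck[mid:]
--     out = [x for pair in zip(left, right) for x in pair]
--     out.extend(right[len(left):])
--     return out
-- ===== Notes on version B (the rewrite author's own statement) =====
-- stated objective: idiomatic
-- what changed: Replaces the alternating while-loop with front pops (O(n^2) from pop(0)) by a zip-and-flatten pass over the two halves plus the leftover tail of the longer half.
import Mathlib
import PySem

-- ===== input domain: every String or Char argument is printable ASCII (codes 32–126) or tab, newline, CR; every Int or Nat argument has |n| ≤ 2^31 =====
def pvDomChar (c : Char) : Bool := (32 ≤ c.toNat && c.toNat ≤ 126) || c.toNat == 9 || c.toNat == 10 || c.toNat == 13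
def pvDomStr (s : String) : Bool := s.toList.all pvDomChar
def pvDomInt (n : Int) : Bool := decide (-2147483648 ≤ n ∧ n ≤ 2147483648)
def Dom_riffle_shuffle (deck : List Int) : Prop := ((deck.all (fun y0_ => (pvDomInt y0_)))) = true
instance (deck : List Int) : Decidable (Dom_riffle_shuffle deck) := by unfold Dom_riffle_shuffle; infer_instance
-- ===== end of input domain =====

-- B replaces the alternating front-pop while-loop by a zip-and-flatten pass plus the tail of the longer half.
-- ===== PORT A =====
-- while left or right: if left: append(left.pop(0)); if right: append(right.pop(0))
def riffleLoopA : List Int → List Int → List Int → List Int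
  | [], [], acc => acc
  | l :: ls, r :: rs, acc => riffleLoopA ls rs (acc ++ [l, r])
  | l :: ls, [], acc => riffleLoopA ls [] (acc ++ [l])
  | [], r :: rs, acc => riffleLoopA [] rs (acc ++ [r])

def riffle_shuffle (deck : List Int) : List Int :=
  let mid := deck.length / 2
  let left := deck.take mid
  let right := deck.drop mid
  riffleLoopA left right []

-- ===== PORT B =====
def riffle_shuffle_alt (deck : List Int) : List Int :=
  let mid := deck.length / 2
  let left := deck.take mid
  let right := deck.drop mid
  ((left.zip right).flatMap (fun p => [p.1, p.2])) ++ right.drop left.length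

-- ===== PRECONDITION & SPEC =====
def Spec_riffle_shuffle (deck : List Int) (out : List Int) : Prop := out = riffle_shuffle_alt deck
instance (deck : List Int) (out : List Int) : Decidable (Spec_riffle_shuffle deck out) := by unfold Spec_riffle_shuffle; infer_instance

-- ===== CLAIM (what is proved, stated in full; the proofs are below) =====
def Claim_equal_riffle_shuffle : Prop := ∀ (deck : List Int), Dom_riffle_shuffle deck → Spec_riffle_shuffle deck (riffle_shuffle deck)

-- ===== LEMMAS AND PROOFS =====

lemma riffleLoopA_eq (left : List Int) : ∀ (right acc : List Int),
    riffleLoopA left right acc =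
      acc ++ ((left.zip right).flatMap (fun p => [p.1, p.2]))
          ++ left.drop right.length ++ right.drop left.length := by
  induction left with
  | nil =>
    intro right acc
    induction right generalizing acc with
    | nil => simp [riffleLoopA]
    | cons r rs ih2 => simp [riffleLoopA, ih2]
  | cons l ls ih =>
    intro right acc
    cases right with
    | nil =>
      have : ∀ acc, riffleLoopA (l :: ls) [] acc = acc ++ (l :: ls) := by
        clear ih; induction ls generalizing l with
        | nil => intro acc; simp [riffleLoopA]
        | cons x xs ih2 => intro acc; simp [riffleLoopA, ih2]
      simp [this]
    | cons r rs => simp [riffleLoopA, ih]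

-- ===== VERDICT (by name: the statement is the Claim_ definition above) =====
theorem riffle_shuffle_spec : Claim_equal_riffle_shuffle := by
  intro deck _
  unfold Spec_riffle_shuffle riffle_shuffle riffle_shuffle_alt
  rw [riffleLoopA_eq]
  simp
  omega
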